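-- pv_equiv track=rewrite | github.com/Furkanahii/Rheo-MVP | Cmpe 150/Cmpe HW4/hw6/HW6-2023400312.py | misalign
-- ===== SOURCE A (Python) =====
-- def misalign(matris):
--     boy = len(matris)
--     en = len(matris[0])
--
--     for j in range(en):
--         if j % 2 == 1:
--             sutun = []
--             for i in range(boy):
--                 sutun.append(matris[i][j])
--
--             sutun.reverse()
--
--             for i in range(boy):
--                 matris[i][j] = sutun[i]
--
--     return matris
-- ===== SOURCE B (Python) =====
-- def misalign(matris):
--     boy = len(matris)
--     for j in range(1, len(matris[0]), 2):
--         for i in range(boy // 2):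
--             matris[i][j], matris[boy - 1 - i][j] = matris[boy - 1 - i][j], matris[i][j]
--     return matris
-- ===== Notes on version B (the rewrite author's own statement) =====
-- stated objective: simpler
-- what changed: Replaces the collect-column/reverse/write-back buffer with an in-place two-pointer swap over half the rows of each odd column (iterating odd j directly via range(1, en, 2)), with no auxiliary list.
import Mathlib
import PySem

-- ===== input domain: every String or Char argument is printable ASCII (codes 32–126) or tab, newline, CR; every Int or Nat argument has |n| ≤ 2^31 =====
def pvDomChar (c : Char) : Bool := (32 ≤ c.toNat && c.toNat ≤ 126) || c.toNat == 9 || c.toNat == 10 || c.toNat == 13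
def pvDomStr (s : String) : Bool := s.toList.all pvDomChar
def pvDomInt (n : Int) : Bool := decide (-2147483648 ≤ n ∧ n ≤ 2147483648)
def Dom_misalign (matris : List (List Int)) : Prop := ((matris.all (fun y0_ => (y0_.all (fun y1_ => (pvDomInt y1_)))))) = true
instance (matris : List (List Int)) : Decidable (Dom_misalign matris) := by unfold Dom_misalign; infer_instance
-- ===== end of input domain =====

-- B replaces A's collect-column/reverse/write-back buffer by an in-place two-pointer
-- half-length swap per odd column (iterating the odd j directly): simpler, no auxiliary list.
-- Both Pythons mutate `matris` in place identically and return it; the theorems are about the return value.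

-- ===== PORT A =====
-- matris[i][j] read (IndexError → default, excluded by Pre_)
def pvGet2 (m : List (List Int)) (i j : Nat) : Int :=
  (PySem.List.pyGet? ((PySem.List.pyGet? m (i : Int)).getD []) (j : Int)).getD 0

-- matris[i][j] = v  (out-of-range write is a no-op; Python raises there, excluded by Pre_)
def pvSet2 (m : List (List Int)) (i j : Nat) (v : Int) : List (List Int) :=
  m.set i ((m.getD i []).set j v)

-- body of A's outer 'for j in range(en)' loop
def pvStepA (boy : Nat) (m : List (List Int)) (j : Nat) : List (List Int) :=
  if j % 2 = 1 then
    let sutun := (List.range boy).foldl (fun s i => s ++ [pvGet2 m i j]) ([] : List Int)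
    let sutun2 := sutun.reverse
    (List.range boy).foldl (fun m i => pvSet2 m i j (sutun2.getD i 0)) m
  else m

def misalign (matris : List (List Int)) : List (List Int) :=
  let boy := matris.length
  let en := ((PySem.List.pyGet? matris 0).getD []).length
  (List.range en).foldl (pvStepA boy) matris

-- ===== PORT B =====
-- body of B's 'for j in range(1, len(matris[0]), 2)' loop: the half-length two-pointer swap
def pvStepB (boy : Nat) (m : List (List Int)) (j : Int) : List (List Int) :=
  (List.range (boy / 2)).foldl (fun m i =>
    let a := pvGet2 m (boy - 1 - i) j.toNat
    let b := pvGet2 m i j.toNat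
    pvSet2 (pvSet2 m i j.toNat a) (boy - 1 - i) j.toNat b) m

def misalign_alt (matris : List (List Int)) : List (List Int) :=
  let boy := matris.length
  (PySem.List.pyRange 1 (((PySem.List.pyGet? matris 0).getD []).length : Int) 2).foldl
    (pvStepB boy) matris

-- ===== PRECONDITION & SPEC =====
-- Pre_ excludes exactly the inputs where Python A raises: the empty matrix (matris[0] is an
-- IndexError) and matrices where some row is too short at an odd column index j < len(matris[0]).
def Pre_misalign (matris : List (List Int)) : Prop :=
  matris ≠ [] ∧ ∀ row ∈ matris, ∀ j ∈ List.range matris.headI.length, j % 2 = 1 → j < row.length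
instance (matris : List (List Int)) : Decidable (Pre_misalign matris) := by
  unfold Pre_misalign; infer_instance

def pvWitness_misalign : List (List Int) := [[1, 2, 3], [4, 5, 6]]

def Spec_misalign (matris : List (List Int)) (out : List (List Int)) : Prop := out = misalign_alt matris
instance (matris : List (List Int)) (out : List (List Int)) : Decidable (Spec_misalign matris out) := by unfold Spec_misalign; infer_instance

-- ===== CLAIM (what is proved, stated in full; the proofs are below) =====
def Claim_equal_misalign : Prop := ∀ (matris : List (List Int)), Dom_misalign matris → Pre_misalign matris → Spec_misalign matris (misalign matris)

-- ===== LEMMAS AND PROOFS =====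

-- "reverse column j": the common semantics both per-column bodies are shown to have
def pvRevCol (m : List (List Int)) (j : Nat) : List (List Int) :=
  m.mapIdx (fun i row => row.set j ((m.getD (m.length - 1 - i) []).getD j 0))

theorem pvGet2_eq (m : List (List Int)) (i j : Nat) :
    pvGet2 m i j = (m.getD i []).getD j 0 := by
  simp [pvGet2, PySem.List.pyGet?_natCast, List.getD_eq_getElem?_getD]

theorem getElem?_pvSet2 (m : List (List Int)) (i j : Nat) (v : Int) (t : Nat) :
    (pvSet2 m i j v)[t]? =
      if i = t then (if i < m.length then some ((m.getD i []).set j v) else none)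
      else m[t]? := by
  simp [pvSet2, List.getElem?_set]

theorem length_pvRevCol (m : List (List Int)) (j : Nat) :
    (pvRevCol m j).length = m.length := by
  simp [pvRevCol]

theorem getElem?_pvRevCol (m : List (List Int)) (j t : Nat) :
    (pvRevCol m j)[t]? =
      m[t]?.map (fun row => row.set j ((m.getD (m.length - 1 - t) []).getD j 0)) := by
  simp [pvRevCol, List.getElem?_mapIdx]

theorem set_getD_self (row : List Int) (j : Nat) :
    row.set j (row.getD j 0) = row := by
  by_cases h : j < row.length
  · rw [List.getD_eq_getElem row 0 h]; exact List.set_getElem_self h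
  · exact List.set_eq_of_length_le (by omega)

theorem foldl_build (f : Nat → Int) :
    ∀ (l : List Nat) (s0 : List Int),
      l.foldl (fun s i => s ++ [f i]) s0 = s0 ++ l.map f := by
  intro l
  induction l with
  | nil => simp
  | cons x xs ih => intro s0; simp [List.foldl_cons, ih]

theorem foldl_len_inv (g : List (List Int) → Nat → List (List Int))
    (hg : ∀ a b, (g a b).length = a.length) :
    ∀ (l : List Nat) (m : List (List Int)), (l.foldl g m).length = m.length := by
  intro l
  induction l with
  | nil => simp
  | cons x xs ih => intro m; simp [List.foldl_cons, ih, hg]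

theorem wb_get (j : Nat) (f : Nat → Int) :
    ∀ (n : Nat) (m : List (List Int)) (t : Nat),
      ((List.range n).foldl (fun m i => pvSet2 m i j (f i)) m)[t]? =
        if t < n then m[t]?.map (fun row => row.set j (f t)) else m[t]? := by
  intro n
  induction n with
  | zero => intro m t; simp
  | succ n ih =>
      intro m t
      rw [List.range_succ, List.foldl_append]
      simp only [List.foldl_cons, List.foldl_nil]
      have hlen : ((List.range n).foldl (fun m i => pvSet2 m i j (f i)) m).length = m.length :=
        foldl_len_inv _ (fun a b => by simp [pvSet2]) _ _
      rw [getElem?_pvSet2]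
      by_cases hnt : n = t
      · subst hnt
        rw [hlen]
        by_cases hn : n < m.length
        · simp only [if_pos hn, if_pos (lt_add_one n)]
          have : ((List.range n).foldl (fun m i => pvSet2 m i j (f i)) m).getD n [] = m.getD n [] := by
            rw [List.getD_eq_getElem?_getD, List.getD_eq_getElem?_getD, ih m n]
            simp
          rw [this]
          simp [List.getD_eq_getElem?_getD, List.getElem?_eq_getElem hn]
        · simp only [if_neg hn, if_pos (lt_add_one n)]
          rw [List.getElem?_eq_none (show m.length ≤ n by omega)]
          simp
      · rw [if_neg hnt, ih m t]
        by_cases ht : t < n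
        · rw [if_pos ht, if_pos (by omega)]
        · rw [if_neg ht, if_neg (by omega)]

theorem stepA_eq (boy : Nat) (m : List (List Int)) (j : Nat) (h : m.length = boy) :
    pvStepA boy m j = if j % 2 = 1 then pvRevCol m j else m := by
  unfold pvStepA
  by_cases hj : j % 2 = 1
  · rw [if_pos hj, if_pos hj]
    simp only []
    apply List.ext_getElem?
    intro t
    rw [wb_get, getElem?_pvRevCol]
    by_cases ht : t < boy
    · rw [if_pos ht]
      have hs : (List.range boy).foldl (fun s i => s ++ [pvGet2 m i j]) ([] : List Int)
          = (List.range boy).map (fun i => pvGet2 m i j) := by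
        rw [foldl_build]; simp
      have hlen : ((List.range boy).foldl (fun s i => s ++ [pvGet2 m i j]) ([] : List Int)).length = boy := by
        rw [hs]; simp
      have hv : ((List.range boy).foldl (fun s i => s ++ [pvGet2 m i j]) ([] : List Int)).reverse.getD t 0
          = (m.getD (m.length - 1 - t) []).getD j 0 := by
        rw [List.getD_eq_getElem?_getD, List.getElem?_reverse (by rw [hlen]; exact ht), hlen, hs]
        rw [List.getElem?_map, List.getElem?_range (by omega)]
        simp [pvGet2_eq, h]
      rw [hv]
    · rw [if_neg ht]
      rw [List.getElem?_eq_none (by omega)]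
      simp
  · rw [if_neg hj, if_neg hj]

theorem sb_get (boy jn : Nat) (m : List (List Int)) (h : m.length = boy) :
    ∀ (k : Nat), 2 * k ≤ boy → ∀ (t : Nat),
      ((List.range k).foldl (fun m i =>
          pvSet2 (pvSet2 m i jn (pvGet2 m (boy - 1 - i) jn)) (boy - 1 - i) jn (pvGet2 m i jn)) m)[t]? =
        if t < k ∨ (boy - k ≤ t ∧ t < boy) then
          m[t]?.map (fun row => row.set jn ((m.getD (boy - 1 - t) []).getD jn 0))
        else m[t]? := by
  intro k
  induction k with
  | zero =>
      intro _ t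
      by_cases ht : t < boy
      · rw [if_neg (by omega)]; simp
      · rw [if_neg (by omega)]; simp
  | succ n ih =>
      intro hk t
      have h2 : 2 * n ≤ boy := by omega
      have hnb : n < boy := by omega
      have hne : n ≠ boy - 1 - n := by omega
      rw [List.range_succ, List.foldl_append, List.foldl_cons, List.foldl_nil]
      set m' := (List.range n).foldl (fun m i =>
          pvSet2 (pvSet2 m i jn (pvGet2 m (boy - 1 - i) jn)) (boy - 1 - i) jn (pvGet2 m i jn)) m with hm'
      have hlen' : m'.length = boy := by
        rw [hm']
        rw [foldl_len_inv _ (fun a b => by simp [pvSet2]) _ _]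
        exact h
      have hk' : m'[n]? = m[n]? := by rw [ih h2 n, if_neg (by omega)]
      have hbk : m'[boy - 1 - n]? = m[boy - 1 - n]? := by
        rw [ih h2 (boy - 1 - n), if_neg (by omega)]
      have ha : pvGet2 m' (boy - 1 - n) jn = (m.getD (boy - 1 - n) []).getD jn 0 := by
        rw [pvGet2_eq, List.getD_eq_getElem?_getD (l := m'), hbk, ← List.getD_eq_getElem?_getD]
      have hb : pvGet2 m' n jn = (m.getD n []).getD jn 0 := by
        rw [pvGet2_eq, List.getD_eq_getElem?_getD (l := m'), hk', ← List.getD_eq_getElem?_getD]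
      have hlen2 : (pvSet2 m' n jn (pvGet2 m' (boy - 1 - n) jn)).length = boy := by
        simp [pvSet2, hlen']
      have hgd2 : (pvSet2 m' n jn (pvGet2 m' (boy - 1 - n) jn)).getD (boy - 1 - n) []
          = (m.getD (boy - 1 - n) []) := by
        rw [List.getD_eq_getElem?_getD, getElem?_pvSet2, if_neg hne, hbk,
          ← List.getD_eq_getElem?_getD]
      rw [getElem?_pvSet2, hlen2]
      by_cases ht2 : boy - 1 - n = t
      · -- t is the upper row of the swap
        rw [if_pos ht2, if_pos (by omega)]
        rw [if_pos (by omega : t < n + 1 ∨ boy - (n + 1) ≤ t ∧ t < boy)]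
        rw [hgd2, hb]
        have : m[t]? = some (m.getD t []) := by
          rw [List.getD_eq_getElem (hn := by omega)]
          exact List.getElem?_eq_getElem (by omega)
        rw [this]
        simp only [Option.map_some]
        have hbt : boy - 1 - t = n := by omega
        rw [hbt, ht2]
      · rw [if_neg ht2, getElem?_pvSet2]
        by_cases ht1 : n = t
        · -- t is the lower row of the swap
          rw [if_pos ht1, if_pos (by omega), if_pos (by omega : t < n + 1 ∨ boy - (n + 1) ≤ t ∧ t < boy)]
          rw [ha]
          have hgd1 : m'.getD n [] = m.getD n [] := by
            rw [List.getD_eq_getElem?_getD, hk', ← List.getD_eq_getElem?_getD]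
          rw [hgd1]
          have : m[t]? = some (m.getD t []) := by
            rw [List.getD_eq_getElem (hn := by omega)]
            exact List.getElem?_eq_getElem (by omega)
          rw [this]
          simp only [Option.map_some]
          rw [← ht1]
        · -- untouched row
          rw [if_neg ht1, ih h2 t]
          by_cases hr : t < n ∨ boy - n ≤ t ∧ t < boy
          · rw [if_pos hr, if_pos (by omega)]
          · rw [if_neg hr, if_neg (by omega)]

theorem stepB_eq (boy : Nat) (m : List (List Int)) (j : Int) (h : m.length = boy) :
    pvStepB boy m j = pvRevCol m j.toNat := by
  unfold pvStepB
  simp only []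
  apply List.ext_getElem?
  intro t
  rw [sb_get boy j.toNat m h (boy / 2) (by omega) t, getElem?_pvRevCol, h]
  by_cases hr : t < boy / 2 ∨ boy - boy / 2 ≤ t ∧ t < boy
  · rw [if_pos hr]
  · rw [if_neg hr]
    by_cases ht : t < boy
    · -- the untouched middle row of an odd-height matrix: the column value is rewritten to itself
      have hbt : boy - 1 - t = t := by omega
      rw [hbt]
      rw [List.getElem?_eq_getElem (show t < m.length by omega)]
      simp only [Option.map_some]
      rw [List.getD_eq_getElem (hn := by omega), set_getD_self]
    · rw [List.getElem?_eq_none (show m.length ≤ t by omega)]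
      simp

theorem foldl_range_odd (f : List (List Int) → Nat → List (List Int))
    (hf : ∀ m j, j % 2 = 0 → f m j = m) :
    ∀ (en : Nat) (m : List (List Int)),
      (List.range en).foldl f m = ((List.range (en / 2)).map (fun k => 2 * k + 1)).foldl f m := by
  intro en
  induction en with
  | zero => intro m; simp
  | succ en ih =>
      intro m
      rcases (show en % 2 = 0 ∨ en % 2 = 1 by omega) with e2 | e2
      · have hd : (en + 1) / 2 = en / 2 := by omega
        rw [List.range_succ, List.foldl_append, List.foldl_cons, List.foldl_nil,
          hf _ en e2, ih, hd]
      · have hd : (en + 1) / 2 = en / 2 + 1 := by omega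
        have he : 2 * (en / 2) + 1 = en := by omega
        rw [List.range_succ, List.foldl_append, ih, hd, List.range_succ, List.map_append,
          List.foldl_append]
        simp [he]

theorem foldl_congr_inv (P : List (List Int) → Prop)
    (f g h : List (List Int) → Nat → List (List Int))
    (hph : ∀ a b, P a → P (h a b))
    (hfh : ∀ a b, P a → f a b = h a b)
    (hgh : ∀ a b, P a → g a b = h a b) :
    ∀ (l : List Nat) (m : List (List Int)), P m → l.foldl f m = l.foldl g m := by
  intro l
  induction l with
  | nil => intro m _; rfl
  | cons x xs ih =>
      intro m hm
      simp only [List.foldl_cons]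
      rw [hfh m x hm, hgh m x hm]
      exact ih _ (hph m x hm)

theorem pyRange_odd (en : Nat) :
    PySem.List.pyRange 1 (en : Int) 2 = (List.range (en / 2)).map (fun k => ((2 * k + 1 : Nat) : Int)) := by
  rw [PySem.List.pyRange_of_pos 1 en (by norm_num)]
  have hn : (if (1 : Int) < en then (((en : Int) - 1 + 2 - 1) / 2).toNat else 0) = en / 2 := by
    split_ifs <;> omega
  rw [hn]
  apply List.map_congr_left
  intro k _
  push_cast
  ring

-- ===== VERDICT (by name: the statement is the Claim_ definition above) =====
theorem misalign_spec : Claim_equal_misalign := by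
  intro matris _ _
  unfold Spec_misalign misalign misalign_alt
  simp only []
  rw [foldl_range_odd (pvStepA matris.length)
      (fun m j hj => by unfold pvStepA; rw [if_neg (by omega)])]
  rw [pyRange_odd, List.foldl_map, List.foldl_map]
  refine foldl_congr_inv (fun m => m.length = matris.length)
    (fun m k => pvStepA matris.length m (2 * k + 1))
    (fun m k => pvStepB matris.length m ((2 * k + 1 : Nat) : Int))
    (fun m k => pvRevCol m (2 * k + 1)) ?_ ?_ ?_ _ _ rfl
  · intro a b hP
    simp only []
    rw [length_pvRevCol]
    exact hP
  · intro a b hP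
    simp only []
    rw [stepA_eq matris.length a (2 * b + 1) hP, if_pos (by omega)]
  · intro a b hP
    simp only []
    rw [stepB_eq matris.length a ((2 * b + 1 : Nat) : Int) hP, Int.toNat_natCast]
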